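-- pv_equiv track=rewrite | github.com/hsynj/Advanced-Programming-HW-Python- | HW4/1.py | un_convert
-- ===== SOURCE A (Python) =====
-- FOR_CONVERT = 'DLRGFAUOWPEZNXHTMYIBJKVQSC'
--
-- def un_convert(convert_str):
--     my_str = ""
--     for c in convert_str:
--         if c in FOR_CONVERT:
--             a = FOR_CONVERT.index(c) + 97
--             my_str += chr(a)
--         else:
--             my_str += c
--     return my_str
-- ===== SOURCE B (Python) =====
-- FOR_CONVERT = 'DLRGFAUOWPEZNXHTMYIBJKVQSC'
--
-- def un_convert(convert_str):
--     # Staged whole-string passes: substitute one cipher letter at a time.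
--     # Correct because the keys (uppercase, all distinct) are never equal to
--     # any replacement (lowercase), so later passes cannot re-hit earlier output.
--     s = convert_str
--     for i, c in enumerate(FOR_CONVERT):
--         s = s.replace(c, chr(97 + i))
--     return s
-- ===== Notes on version B (the rewrite author's own statement) =====
-- stated objective: alternative
-- what changed: B iterates over the fixed alphabet instead of the input: 26 staged whole-string str.replace passes, one per cipher letter (safe because lowercase replacements can never match uppercase keys), replacing A's per-character Python loop with membership test and linear FOR_CONVERT.index scan.
import Mathlib
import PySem

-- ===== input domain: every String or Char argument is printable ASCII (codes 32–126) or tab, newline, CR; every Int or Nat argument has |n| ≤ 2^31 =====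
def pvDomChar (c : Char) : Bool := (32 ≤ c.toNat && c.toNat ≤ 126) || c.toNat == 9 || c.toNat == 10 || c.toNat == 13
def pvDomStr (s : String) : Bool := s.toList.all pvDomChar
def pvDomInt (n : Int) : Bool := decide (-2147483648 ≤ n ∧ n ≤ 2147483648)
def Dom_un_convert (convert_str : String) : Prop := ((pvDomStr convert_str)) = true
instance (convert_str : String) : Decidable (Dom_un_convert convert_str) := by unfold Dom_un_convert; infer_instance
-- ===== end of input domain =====

-- B iterates over the fixed alphabet instead of the input: 26 staged whole-string
-- replace passes, one per cipher letter, instead of A's per-character loop with a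
-- membership test and a linear FOR_CONVERT.index scan.

-- ===== PORT A =====
-- FOR_CONVERT = 'DLRGFAUOWPEZNXHTMYIBJKVQSC' (as its character list)
def forConvert : List Char :=
  ['D','L','R','G','F','A','U','O','W','P','E','Z','N','X','H','T','M','Y','I','B','J','K','V','Q','S','C']

-- literal port of A: loop over the characters, membership test, then FOR_CONVERT.index(c)+97
def un_convert (convert_str : String) : String :=
  String.ofList (convert_str.toList.foldl
    (fun my_str c =>
      if forConvert.contains c then
        match PySem.List.index? forConvert c with
        | some i => my_str ++ [Char.ofNat (i + 97)]
        | none => my_str ++ [c]   -- unreachable: c ∈ FOR_CONVERT here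
      else
        my_str ++ [c]) [])

-- ===== PORT B =====
-- for i, c in enumerate(FOR_CONVERT): s = s.replace(c, chr(97 + i))
def un_convert_alt (convert_str : String) : String :=
  (PySem.List.enumerate forConvert).foldl
    (fun s p => PySem.Str.replace s (String.ofList [p.2]) (String.ofList [Char.ofNat ((97 : Int) + p.1).toNat]))
    convert_str

-- ===== PRECONDITION & SPEC =====
def Spec_un_convert (convert_str : String) (out : String) : Prop := out = un_convert_alt convert_str
instance (convert_str : String) (out : String) : Decidable (Spec_un_convert convert_str out) := by unfold Spec_un_convert; infer_instance

-- ===== CLAIM =====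
def Claim_equal_un_convert : Prop := ∀ (convert_str : String), Dom_un_convert convert_str → Spec_un_convert convert_str (un_convert convert_str)

-- ===== LEMMAS AND PROOFS =====

-- per-character value of A's loop body
def stepA (c : Char) : Char :=
  if forConvert.contains c then
    match PySem.List.index? forConvert c with
    | some i => Char.ofNat (i + 97)
    | none => c
  else c

-- single-character substitution, and its iteration over the enumerated alphabet
def subst (k r c : Char) : Char := if c = k then r else c

def applyAll : List (Int × Char) → Char → Char
  | [], c => c
  | (i, k) :: rest, c => applyAll rest (subst k (Char.ofNat ((97 : Int) + i).toNat) c)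

lemma foldl_eq_mapA (l : List Char) (acc : List Char) :
    l.foldl (fun my_str c =>
      if forConvert.contains c then
        match PySem.List.index? forConvert c with
        | some i => my_str ++ [Char.ofNat (i + 97)]
        | none => my_str ++ [c]
      else my_str ++ [c]) acc = acc ++ l.map stepA := by
  induction l generalizing acc with
  | nil => simp
  | cons c l ih =>
      simp only [List.foldl_cons, List.map_cons, ih]
      have hbody : (if forConvert.contains c then
          match PySem.List.index? forConvert c with
          | some i => acc ++ [Char.ofNat (i + 97)]
          | none => acc ++ [c]
        else acc ++ [c]) = acc ++ [stepA c] := by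
        unfold stepA
        split_ifs with h
        · cases PySem.List.index? forConvert c <;> simp
        · rfl
      rw [hbody]
      simp

-- replace with a one-character pattern and one-character replacement is a map
lemma go_single (o r : Char) : ∀ (l acc : List Char),
    PySem.Chars.replace.go [o] [r] l.length l acc = acc.reverse ++ l.map (subst o r) := by
  intro l
  induction l with
  | nil => intro acc; simp [PySem.Chars.replace.go]
  | cons c t ih =>
      intro acc
      rw [List.length_cons, PySem.Chars.replace.go]
      by_cases h : c = o
      · have hp : List.isPrefixOf [o] (c :: t) = true := by
          simp [List.isPrefixOf, h]
        simp only [hp, if_true]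
        have hdrop : List.drop [o].length (c :: t) = t := by simp
        rw [hdrop, ih]
        simp [subst, h]
      · have hp : List.isPrefixOf [o] (c :: t) = false := by
          simp [List.isPrefixOf]
          exact fun hoc => absurd hoc.symm h
        simp only [hp]
        rw [ih]
        simp [subst, h]

lemma replace_single (o r : Char) (l : List Char) :
    PySem.Chars.replace l [o] [r] = l.map (subst o r) := by
  rw [PySem.Chars.replace]
  simp only [List.isEmpty_cons]
  simpa using go_single o r l []

lemma foldl_replace (ps : List (Int × Char)) : ∀ (s : String),
    (ps.foldl (fun s p =>
        PySem.Str.replace s (String.ofList [p.2]) (String.ofList [Char.ofNat ((97 : Int) + p.1).toNat])) s).toList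
      = s.toList.map (applyAll ps) := by
  induction ps with
  | nil => intro s; simp [applyAll]
  | cons p rest ih =>
      intro s
      obtain ⟨i, k⟩ := p
      rw [List.foldl_cons, ih]
      have h : (PySem.Str.replace s (String.ofList [k]) (String.ofList [Char.ofNat ((97 : Int) + i).toNat])).toList
          = s.toList.map (subst k (Char.ofNat ((97 : Int) + i).toNat)) := by
        rw [PySem.Str.toList_replace]
        simpa [String.toList_ofList] using replace_single k (Char.ofNat ((97 : Int) + i).toNat) s.toList
      rw [h, List.map_map]
      rfl

-- the 26 staged substitutions agree with A's single-pass substitution on every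
-- character of the domain (codes 0..126 cover printable ASCII plus tab/LF/CR)
lemma stepA_eq_applyAll_fin :
    ∀ n : Fin 127, applyAll (PySem.List.enumerate forConvert) (Char.ofNat n.val)
      = stepA (Char.ofNat n.val) := by
  set_option maxRecDepth 40000 in decide

lemma stepA_eq_applyAll (c : Char) (h : pvDomChar c = true) :
    applyAll (PySem.List.enumerate forConvert) c = stepA c := by
  have hle : c.toNat < 127 := by
    simp [pvDomChar] at h
    omega
  have := stepA_eq_applyAll_fin ⟨c.toNat, hle⟩
  simpa [Char.ofNat_toNat] using this

-- ===== VERDICT =====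
theorem un_convert_spec : Claim_equal_un_convert := by
  intro s hdom
  unfold Spec_un_convert un_convert
  have hB : (un_convert_alt s).toList = s.toList.map (applyAll (PySem.List.enumerate forConvert)) := by
    unfold un_convert_alt
    exact foldl_replace _ s
  have hAB : s.toList.map stepA = (un_convert_alt s).toList := by
    rw [hB]
    refine List.map_congr_left (fun c hc => ?_)
    have hdc : pvDomChar c = true := by
      have := hdom
      unfold Dom_un_convert pvDomStr at this
      exact List.all_eq_true.mp this c hc
    exact (stepA_eq_applyAll c hdc).symm
  rw [foldl_eq_mapA, List.nil_append, hAB]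
  exact String.ofList_toList
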